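-- pv_equiv track=rewrite | github.com/codeWriter9/cautious-python-learner | Translator.py | fprintf
-- ===== SOURCE A (Python) =====
-- def fprintf(characters):
--     output = '';
--     for character in characters:
--         if character == 'G':
--             output = output + 'C';
--         elif character == 'C':
--             output = output + 'G';
--         elif character == 'T':
--             output = output + 'A';
--         elif character == 'A':
--             output = output + 'U';
--         else :
--             return 'Invalid Input';
--     return output;
-- ===== SOURCE B (Python) =====
-- _M = {'G': 'C', 'C': 'G', 'T': 'A', 'A': 'U'}
--
-- def fprintf(characters):
--     chars = list(characters)
--
--     def go(lo, hi):
--         # divide and conquer: map the slice chars[lo:hi]; None signals an invalid char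
--         if hi - lo == 0:
--             return ''
--         if hi - lo == 1:
--             return _M.get(chars[lo])
--         mid = (lo + hi) // 2
--         left = go(lo, mid)
--         if left is None:
--             return None
--         right = go(mid, hi)
--         if right is None:
--             return None
--         return left + right
--
--     r = go(0, len(chars))
--     return 'Invalid Input' if r is None else r
-- ===== Notes on version B (the rewrite author's own statement) =====
-- stated objective: alternative
-- what changed: Replaces A's left-to-right accumulator loop with an early return by a divide-and-conquer recursion that splits the input in halves, maps each half independently (None propagating an invalid character upward) and concatenates the results.
import Mathlib
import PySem

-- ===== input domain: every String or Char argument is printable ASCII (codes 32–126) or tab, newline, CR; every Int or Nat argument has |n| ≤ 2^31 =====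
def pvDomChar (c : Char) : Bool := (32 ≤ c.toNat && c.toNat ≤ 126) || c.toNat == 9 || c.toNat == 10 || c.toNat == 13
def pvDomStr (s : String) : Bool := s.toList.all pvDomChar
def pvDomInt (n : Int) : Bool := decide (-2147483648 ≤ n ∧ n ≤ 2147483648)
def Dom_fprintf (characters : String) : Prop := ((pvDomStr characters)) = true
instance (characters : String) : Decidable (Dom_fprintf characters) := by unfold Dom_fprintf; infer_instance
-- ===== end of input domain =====

-- B replaces A's left-to-right accumulator loop by a divide-and-conquer
-- recursion on halves of the input (objective: alternative decomposition).


-- ===== PORT A =====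
-- A's loop: accumulate the output; the first unmapped character returns
-- 'Invalid Input' immediately.
def fprintfGo : List Char → List Char → String
  | [], out => String.mk out
  | c :: rest, out =>
    if c = 'G' then fprintfGo rest (out ++ ['C'])
    else if c = 'C' then fprintfGo rest (out ++ ['G'])
    else if c = 'T' then fprintfGo rest (out ++ ['A'])
    else if c = 'A' then fprintfGo rest (out ++ ['U'])
    else "Invalid Input"

def fprintf (characters : String) : String := fprintfGo characters.toList []

-- ===== PORT B =====
-- the mapping table (_M.get in Source B): none = key absent
def fprintfTbl (c : Char) : Option Char :=
  if c = 'G' then some 'C'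
  else if c = 'C' then some 'G'
  else if c = 'T' then some 'A'
  else if c = 'A' then some 'U'
  else none

-- Source B's go: divide and conquer on the char list; none signals an invalid char
def fbGo (l : List Char) : Option (List Char) :=
  if hlen : l.length ≤ 1 then
    match l with
    | [] => some []
    | c :: _ => (fprintfTbl c).map ([·])
  else
    let mid := l.length / 2
    match fbGo (l.take mid) with
    | none => none
    | some left =>
      match fbGo (l.drop mid) with
      | none => none
      | some right => some (left ++ right)
termination_by l.length
decreasing_by
  · simp [List.length_take]; omega
  · simp [List.length_drop]; omega

def fprintf_alt (characters : String) : String :=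
  match fbGo characters.toList with
  | none => "Invalid Input"
  | some out => String.mk out

-- ===== PRECONDITION & SPEC =====
def Spec_fprintf (characters : String) (out : String) : Prop := out = fprintf_alt characters
instance (characters : String) (out : String) : Decidable (Spec_fprintf characters out) := by unfold Spec_fprintf; infer_instance

-- ===== CLAIM (what is proved, stated in full; the proofs are below) =====
def Claim_equal_fprintf : Prop := ∀ (characters : String), Dom_fprintf characters → Spec_fprintf characters (fprintf characters)

-- ===== LEMMAS AND PROOFS =====
-- A's loop computes: valid input ⇒ acc ++ mapped chars, else the error string.
theorem fprintfGo_eq (l : List Char) : ∀ acc : List Char,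
    fprintfGo l acc =
      if l.all (fun c => (fprintfTbl c).isSome) then
        String.mk (acc ++ l.map (fun c => (fprintfTbl c).getD ' '))
      else "Invalid Input" := by
  induction l with
  | nil => intro acc; simp [fprintfGo]
  | cons c rest ih =>
    intro acc
    by_cases hG : c = 'G'
    · simp [fprintfGo, hG, fprintfTbl, ih]
    · by_cases hC : c = 'C'
      · simp [fprintfGo, hC, fprintfTbl, ih]
      · by_cases hT : c = 'T'
        · simp [fprintfGo, hT, fprintfTbl, ih]
        · by_cases hA : c = 'A'
          · simp [fprintfGo, hA, fprintfTbl, ih]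
          · simp [fprintfGo, hG, hC, hT, hA, fprintfTbl]

-- B's divide-and-conquer computes: valid input ⇒ some (mapped chars), else none.
theorem fbGo_eq (l : List Char) :
    fbGo l =
      if l.all (fun c => (fprintfTbl c).isSome) then
        some (l.map (fun c => (fprintfTbl c).getD ' '))
      else none := by
  induction hn : l.length using Nat.strong_induction_on generalizing l with
  | _ n ih =>
    subst hn
    by_cases hlen : l.length ≤ 1
    · match l with
      | [] => simp [fbGo]
      | [c] =>
        rw [fbGo]
        simp only [List.length_singleton]
        cases h : fprintfTbl c <;> simp [h, Option.isSome]
      | c :: d :: rest => simp at hlen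
    · rw [fbGo]
      simp only [dif_neg hlen]
      have h2 : 2 ≤ l.length := by omega
      have htake : (l.take (l.length / 2)).length < l.length := by
        simp [List.length_take]; omega
      have hdrop : (l.drop (l.length / 2)).length < l.length := by
        simp [List.length_drop]; omega
      rw [ih _ htake _ rfl, ih _ hdrop _ rfl]
      have hsplit : l.take (l.length / 2) ++ l.drop (l.length / 2) = l :=
        List.take_append_drop _ _
      by_cases hA : (l.take (l.length / 2)).all (fun c => (fprintfTbl c).isSome)
      · by_cases hB : (l.drop (l.length / 2)).all (fun c => (fprintfTbl c).isSome)
        · have : l.all (fun c => (fprintfTbl c).isSome) := by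
            rw [← hsplit, List.all_append, hA, hB]; rfl
          simp [hA, hB, this, ← List.map_append, hsplit]
        · have : ¬ l.all (fun c => (fprintfTbl c).isSome) := by
            rw [← hsplit, List.all_append]; simp [hB]
          simp [hA, hB, this]
      · have : ¬ l.all (fun c => (fprintfTbl c).isSome) := by
          rw [← hsplit, List.all_append]; simp [hA]
        simp [hA, this]

-- ===== VERDICT (by name: the statement is the Claim_ definition above) =====
theorem fprintf_spec : Claim_equal_fprintf := by
  intro characters _
  unfold Spec_fprintf fprintf fprintf_alt
  rw [fprintfGo_eq, fbGo_eq]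
  by_cases h : characters.toList.all (fun c => (fprintfTbl c).isSome) <;> simp [h]
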